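-- pv_equiv track=rewrite | github.com/Cyber-Programmer/LawChronicle | backend/tools/tool-field-cleaning-dryrun.py | find_common_fields
-- ===== SOURCE A (Python) =====
-- def find_common_fields(sections):
--     if not sections:
--         return {}
--     common = set(sections[0].keys())
--     for s in sections[1:]:
--         common &= set(s.keys())
--     for k in list(common):
--         if k in ("Section", "Content", "_id"):
--             common.discard(k)
--     res = {}
--     for k in common:
--         first = sections[0].get(k)
--         if all(s.get(k) == first for s in sections):
--             res[k] = first
--     return res
-- ===== SOURCE B (Python) =====
-- def find_common_fields(sections):
--     if not sections:
--         return {}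
--     # start from the candidate fields of the first section (reserved keys dropped),
--     # then sweep the remaining sections once, narrowing the candidate dict:
--     # a pair survives a section only if that section maps the key to the same value.
--     acc = {k: v for k, v in sections[0].items()
--            if k not in ("Section", "Content", "_id")}
--     for s in sections[1:]:
--         acc = {k: v for k, v in acc.items() if s.get(k) == v}
--     return acc
-- ===== Notes on version B (the rewrite author's own statement) =====
-- stated objective: alternative
-- what changed: A first computes the intersection of all key sets, discards reserved keys, then for each surviving key re-scans every section with all(); B does a single left-to-right sweep over the sections, maintaining a candidate dict (first section minus reserved keys) that each subsequent section narrows to the pairs it agrees with, with no key-set phase and no per-key all() scan.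
import Mathlib
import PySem

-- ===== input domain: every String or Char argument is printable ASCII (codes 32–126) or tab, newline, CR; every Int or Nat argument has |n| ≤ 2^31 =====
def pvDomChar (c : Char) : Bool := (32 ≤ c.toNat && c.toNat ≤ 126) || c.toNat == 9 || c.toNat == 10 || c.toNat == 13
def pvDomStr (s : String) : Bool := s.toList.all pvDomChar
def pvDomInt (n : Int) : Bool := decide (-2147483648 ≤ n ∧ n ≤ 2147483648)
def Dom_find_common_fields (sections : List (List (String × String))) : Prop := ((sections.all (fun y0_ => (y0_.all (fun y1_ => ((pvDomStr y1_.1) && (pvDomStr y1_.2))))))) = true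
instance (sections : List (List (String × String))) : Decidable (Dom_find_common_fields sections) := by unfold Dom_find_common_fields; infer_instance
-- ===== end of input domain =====

-- B replaces A's intersect-key-sets-then-verify-each-key structure by a single sweep over the
-- sections that narrows a candidate dict (objective: alternative decomposition, same cost).

-- k in ("Section", "Content", "_id")   (used verbatim by both Pythons)
def pvExcl (k : String) : Bool := k == "Section" || k == "Content" || k == "_id"

-- ===== PORT A =====
def find_common_fields (sections : List (List (String × String))) : List (String × String) :=
  match sections with
  | [] => []
  | s0 :: rest =>
    let d0 := PySem.Dict.ofList s0
    let common0 : PySem.Set String := PySem.Set.ofList d0.keys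
    let common1 := rest.foldl
      (fun c s => PySem.Set.inter c (PySem.Set.ofList (PySem.Dict.ofList s).keys)) common0
    let common2 := common1.foldl
      (fun c k => if pvExcl k then PySem.Set.discard c k else c) common1
    let res := common2.foldl (fun r k =>
        if (s0 :: rest).all (fun s => (PySem.Dict.ofList s).get? k == d0.get? k) then
          match d0.get? k with
          | some v => r.insert k v
          | none => r          -- unreachable: k ∈ common2 ⊆ d0.keys, so sections[0].get(k) = some _
        else r) PySem.Dict.empty
    res.items

-- ===== PORT B =====
-- the candidate dicts always have distinct keys, so each comprehension-built dict IS its item list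
def find_common_fields_alt (sections : List (List (String × String))) : List (String × String) :=
  match sections with
  | [] => []
  | s0 :: rest =>
    let acc0 := (PySem.Dict.ofList s0).items.filter (fun kv => !pvExcl kv.1)
    rest.foldl
      (fun acc s => acc.filter (fun kv => (PySem.Dict.ofList s).get? kv.1 == some kv.2)) acc0

-- ===== PRECONDITION & SPEC =====
def Spec_find_common_fields (sections : List (List (String × String))) (out : List (String × String)) : Prop := out = find_common_fields_alt sections
instance (sections : List (List (String × String))) (out : List (String × String)) : Decidable (Spec_find_common_fields sections out) := by unfold Spec_find_common_fields; infer_instance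

-- ===== CLAIM (what is proved, stated in full; the proofs are below) =====
def Claim_equal_find_common_fields : Prop := ∀ (sections : List (List (String × String))), Dom_find_common_fields sections → Spec_find_common_fields sections (find_common_fields sections)

-- ===== LEMMAS AND PROOFS =====

-- B's narrowing sweep is one filter by the conjunction over the swept sections
lemma pv_foldl_filter {α β : Type} (p : β → α → Bool) :
    ∀ (l : List β) (acc : List α),
      l.foldl (fun acc s => acc.filter (p s)) acc
        = acc.filter (fun x => l.all (fun s => p s x)) := by
  intro l
  induction l with
  | nil => intro acc; simp
  | cons s l ih =>
    intro acc
    simp only [List.foldl_cons, ih, List.filter_filter, List.all_cons]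
    exact List.filter_congr (fun x _ => Bool.and_comm _ _)

-- phase 1 of A: the iterated set intersection is one filter over the first key list
lemma pv_foldl_inter (rest : List (List (String × String))) :
    ∀ (c : List String),
      rest.foldl (fun c s => PySem.Set.inter c (PySem.Set.ofList (PySem.Dict.ofList s).keys)) c
        = c.filter (fun k => rest.all
            (fun s => PySem.Set.contains (PySem.Set.ofList (PySem.Dict.ofList s).keys) k)) := by
  induction rest with
  | nil => intro c; simp
  | cons s rest ih =>
    intro c
    have hinter : PySem.Set.inter c (PySem.Set.ofList (PySem.Dict.ofList s).keys)
        = c.filter (fun k => PySem.Set.contains (PySem.Set.ofList (PySem.Dict.ofList s).keys) k) := rfl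
    simp only [List.foldl_cons, ih, hinter, List.filter_filter, List.all_cons]
    exact List.filter_congr (fun x _ => Bool.and_comm _ _)

-- phase 2 of A: the discard loop over the snapshot list is a filter
lemma pv_foldl_discard (p : String → Bool) :
    ∀ (l c : List String),
      l.foldl (fun c k => if p k then PySem.Set.discard c k else c) c
        = c.filter (fun x => !(p x && l.contains x)) := by
  intro l
  induction l with
  | nil => intro c; simp
  | cons k l ih =>
    intro c
    by_cases hk : p k = true
    · have hdis : PySem.Set.discard c k = c.filter (fun y => !(y == k)) := rfl
      simp only [List.foldl_cons, hk, if_true, hdis, ih, List.filter_filter]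
      apply List.filter_congr
      intro x _
      by_cases hx : x = k
      · subst hx; simp [hk]
      · simp [hx]
    · simp only [List.foldl_cons, hk, if_false, Bool.false_eq_true, ih]
      apply List.filter_congr
      intro x _
      by_cases hx : x = k
      · subst hx; simp [Bool.eq_false_iff.mpr hk]
      · simp [hx]

-- phase 3 of A: inserting fresh distinct keys taken from sections[0] appends the filtered pairs
lemma pv_foldl_insert (s0 : List (String × String)) (rest : List (List (String × String))) :
    ∀ (l : List String) (r : PySem.Dict String String), l.Nodup →
      (∀ k ∈ l, r.contains k = false) → (∀ k ∈ l, k ∈ (PySem.Dict.ofList s0).keys) →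
      (l.foldl (fun r k =>
          if (s0 :: rest).all (fun s => (PySem.Dict.ofList s).get? k == (PySem.Dict.ofList s0).get? k) then
            match (PySem.Dict.ofList s0).get? k with
            | some v => r.insert k v
            | none => r
          else r) r).items
        = r.items
          ++ (l.filter (fun k => (s0 :: rest).all
                (fun s => (PySem.Dict.ofList s).get? k == (PySem.Dict.ofList s0).get? k))).map
              (fun k => (k, (PySem.Dict.ofList s0).getD k "")) := by
  intro l
  induction l with
  | nil => intro r _ _ _; simp
  | cons k l ih =>
    intro r hnd hfresh hmem
    have hk : k ∈ (PySem.Dict.ofList s0).keys := hmem k (by simp)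
    have hsome : ∃ v, (PySem.Dict.ofList s0).get? k = some v := by
      rcases h : (PySem.Dict.ofList s0).get? k with _ | v
      · rw [PySem.Dict.get?_eq_none_iff_not_mem_keys] at h
        exact absurd hk h
      · exact ⟨v, rfl⟩
    rcases hsome with ⟨v, hv⟩
    have hget : (PySem.Dict.ofList s0).getD k "" = v := PySem.Dict.getD_of_get?_eq_some _ "" hv
    have hkl : k ∉ l := (List.nodup_cons.mp hnd).1
    have hndl : l.Nodup := (List.nodup_cons.mp hnd).2
    by_cases hc : ((s0 :: rest).all
        (fun s => (PySem.Dict.ofList s).get? k == (PySem.Dict.ofList s0).get? k)) = true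
    · have hstep : (if (s0 :: rest).all (fun s => (PySem.Dict.ofList s).get? k == (PySem.Dict.ofList s0).get? k) then
            match (PySem.Dict.ofList s0).get? k with
            | some v => r.insert k v
            | none => r
          else r) = r.insert k v := by
        rw [if_pos hc, hv]
      rw [List.foldl_cons, hstep,
        ih (r.insert k v) hndl
          (by
            intro k' hk'
            have hne : (k' == k) = false := by
              simp only [beq_eq_false_iff_ne, ne_eq]
              intro h; exact hkl (h ▸ hk')
            rw [PySem.Dict.contains_insert, hne, Bool.false_or]
            exact hfresh k' (List.mem_cons_of_mem _ hk'))
          (fun k' hk' => hmem k' (List.mem_cons_of_mem _ hk')),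
        PySem.Dict.items_insert_of_not_contains _ _ (hfresh k (by simp)), List.filter_cons]
      simp only [hc, if_true, List.map_cons, hget, List.append_assoc, List.singleton_append]
    · have hstep : (if (s0 :: rest).all (fun s => (PySem.Dict.ofList s).get? k == (PySem.Dict.ofList s0).get? k) then
            match (PySem.Dict.ofList s0).get? k with
            | some v => r.insert k v
            | none => r
          else r) = r := by
        rw [if_neg (by simpa using hc)]
      rw [List.foldl_cons, hstep,
        ih r hndl (fun k' hk' => hfresh k' (List.mem_cons_of_mem _ hk'))
          (fun k' hk' => hmem k' (List.mem_cons_of_mem _ hk')), List.filter_cons]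
      have hcf : ((s0 :: rest).all
          (fun s => (PySem.Dict.ofList s).get? k == (PySem.Dict.ofList s0).get? k)) = false := by
        simpa using hc
      simp only [hcf, Bool.false_eq_true, if_false]

-- the two per-key conditions coincide on keys of sections[0]
lemma pv_cond_eq (s0 : List (String × String)) (rest : List (List (String × String)))
    (k : String) (hk : k ∈ (PySem.Dict.ofList s0).keys) :
    ((rest.all (fun s => PySem.Set.contains (PySem.Set.ofList (PySem.Dict.ofList s).keys) k)
        && !pvExcl k)
      && (s0 :: rest).all (fun s => (PySem.Dict.ofList s).get? k == (PySem.Dict.ofList s0).get? k))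
    = (!pvExcl k
        && rest.all (fun s => (PySem.Dict.ofList s).get? k == some ((PySem.Dict.ofList s0).getD k ""))) := by
  have hsome : ∃ v, (PySem.Dict.ofList s0).get? k = some v := by
    rcases h : (PySem.Dict.ofList s0).get? k with _ | v
    · rw [PySem.Dict.get?_eq_none_iff_not_mem_keys] at h
      exact absurd hk h
    · exact ⟨v, rfl⟩
  rcases hsome with ⟨v, hv⟩
  have hget : (PySem.Dict.ofList s0).getD k "" = v := PySem.Dict.getD_of_get?_eq_some _ "" hv
  rw [hget, hv]
  simp only [List.all_cons, hv, beq_self_eq_true, Bool.true_and]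
  apply Bool.eq_iff_iff.mpr
  simp only [Bool.and_eq_true, List.all_eq_true]
  constructor
  · rintro ⟨⟨_, hex⟩, heq⟩; exact ⟨hex, heq⟩
  · rintro ⟨hex, heq⟩
    refine ⟨⟨?_, hex⟩, heq⟩
    intro s hs
    have h1 : (PySem.Dict.ofList s).get? k = some v := by
      have := heq s hs; simpa using this
    have h2 : k ∈ (PySem.Dict.ofList s).keys := by
      by_contra hno
      rw [(PySem.Dict.get?_eq_none_iff_not_mem_keys (d := PySem.Dict.ofList s) (k := k)).mpr hno] at h1
      simp at h1
    simp [PySem.Set.mem_ofList, h2]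

-- ===== VERDICT (by name: the statement is the Claim_ definition above) =====
theorem find_common_fields_spec : Claim_equal_find_common_fields := by
  intro sections _
  unfold Spec_find_common_fields
  cases sections with
  | nil => rfl
  | cons s0 rest =>
    have hnd : (PySem.Dict.ofList s0).keys.Nodup := PySem.Dict.nodup_keys_ofList s0
    show (find_common_fields (s0 :: rest)) = _
    simp only [find_common_fields, find_common_fields_alt]
    rw [pv_foldl_filter, List.filter_filter,
      PySem.Set.ofList_eq_self_of_nodup _ hnd, pv_foldl_inter, pv_foldl_discard]
    -- name the intersection filter
    set P : String → Bool :=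
      fun k => rest.all (fun s => PySem.Set.contains (PySem.Set.ofList (PySem.Dict.ofList s).keys) k)
      with hP
    have hdiscard :
        ((PySem.Dict.ofList s0).keys.filter P).filter
            (fun x => !(pvExcl x && ((PySem.Dict.ofList s0).keys.filter P).contains x))
          = (PySem.Dict.ofList s0).keys.filter (fun k => P k && !pvExcl k) := by
      rw [List.filter_filter]
      apply List.filter_congr
      intro x hx
      by_cases hPx : P x = true
      · have hmemf : x ∈ List.filter P (PySem.Dict.ofList s0).keys := List.mem_filter.mpr ⟨hx, hPx⟩
        simp [hPx, hmemf]
      · simp [hPx]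
    rw [hdiscard, pv_foldl_insert s0 rest _ _
          (hnd.filter _)
          (fun k _ => PySem.Dict.contains_empty k)
          (fun k hkm => (List.mem_filter.mp hkm).1),
        List.filter_filter]
    have hitems : (PySem.Dict.ofList s0).items
        = (PySem.Dict.ofList s0).keys.map (fun k => (k, (PySem.Dict.ofList s0).getD k "")) :=
      PySem.Dict.items_eq_map_keys _ hnd ""
    have hcond : ∀ k ∈ (PySem.Dict.ofList s0).keys,
        (((s0 :: rest).all fun s => (PySem.Dict.ofList s).get? k == (PySem.Dict.ofList s0).get? k) &&
            (P k && !pvExcl k))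
          = ((fun kv => (rest.all
                (fun s => (PySem.Dict.ofList s).get? kv.1 == some kv.2)) && !pvExcl kv.1) ∘
              fun k => (k, (PySem.Dict.ofList s0).getD k "")) k := by
      intro k hkm
      have h := Bool.eq_iff_iff.mp (pv_cond_eq s0 rest k hkm)
      apply Bool.eq_iff_iff.mpr
      simp only [hP, Function.comp_apply, Bool.and_eq_true] at h ⊢
      tauto
    rw [hitems, List.filter_map]
    simp only [PySem.Dict.empty, List.nil_append]
    exact congrArg (List.map _) (List.filter_congr hcond)
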